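-- pv_equiv track=rewrite | github.com/ansible/ansible | lib/ansible/module_utils/ne.py | rm_config_prefix
-- ===== SOURCE A (Python) =====
-- def rm_config_prefix(cfg):
--     if not cfg:
--         return cfg
--
--     cmds = cfg.split("\n")
--     for i in range(len(cmds)):
--         if not cmds[i]:
--             continue
--         if '~' in cmds[i]:
--             index = cmds[i].index('~')
--             if cmds[i][:index] == ' ' * index:
--                 cmds[i] = cmds[i].replace("~", "", 1)
--     return '\n'.join(cmds)
-- ===== SOURCE B (Python) =====
-- def rm_config_prefix(cfg):
--     if not cfg:
--         return cfg
--     # Single pass over the characters with a one-bit state machine: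
--     # 'armed' is set while only spaces have been seen on the current line;
--     # a tilde met while armed is dropped and clears the flag; everything else is copied.
--     out = []
--     armed = True
--     for ch in cfg:
--         if ch == '~' and armed:
--             armed = False
--             continue
--         if ch == '\n':
--             armed = True
--         elif ch != ' ':
--             armed = False
--         out.append(ch)
--     return ''.join(out)
-- ===== Notes on version B (the rewrite author's own statement) =====
-- stated objective: alternative
-- what changed: Replaces A's split-into-lines / index / slice-compare / replace loop with a single character-level pass over the whole string driven by a one-bit armed flag (set at each line start, cleared by the first non-space), never materialising a line list.
import Mathlib
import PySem

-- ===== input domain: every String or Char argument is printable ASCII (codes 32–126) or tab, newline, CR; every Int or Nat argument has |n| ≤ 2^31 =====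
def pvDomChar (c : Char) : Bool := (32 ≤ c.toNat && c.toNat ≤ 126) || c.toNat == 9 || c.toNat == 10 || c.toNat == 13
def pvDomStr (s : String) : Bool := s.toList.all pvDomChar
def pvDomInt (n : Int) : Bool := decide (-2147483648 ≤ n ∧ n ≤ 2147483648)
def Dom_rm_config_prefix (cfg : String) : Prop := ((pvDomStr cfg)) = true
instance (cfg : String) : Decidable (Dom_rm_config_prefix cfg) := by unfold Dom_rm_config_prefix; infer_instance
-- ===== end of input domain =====

-- B replaces A's split/index/slice-compare/replace per-line loop by a single character pass
-- with a one-bit armed flag that is set at each line start and cleared by the first non-space character (objective: alternative).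

-- ===== PORT A =====
-- hand port of cmds[i].replace("~", "", 1): with empty replacement and count 1 this
-- removes exactly the first occurrence of the tilde — exact for a 1-char pattern
def pvReplaceFirstTilde : List Char → List Char
  | [] => []
  | c :: cs => if c = '~' then cs else c :: pvReplaceFirstTilde cs

-- the body of A's loop for one element cmds[i] (the loop rewrites each entry independently)
def pvLineA (l : List Char) : List Char :=
  if l = [] then l                                   -- if not cmds[i]: continue
  else if PySem.Chars.isIn ['~'] l then              -- if '~' in cmds[i]
    match PySem.List.index? l '~' with               -- index = cmds[i].index('~')
    | some i =>
      if PySem.List.slice l none (some (i : Int)) = List.replicate i ' '   -- cmds[i][:index] == ' ' * index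
      then pvReplaceFirstTilde l else l
    | none => l
  else l

def rm_config_prefix (cfg : String) : String :=
  if cfg = "" then cfg
  else String.ofList (PySem.Chars.join ['\n'] ((PySem.Chars.splitOn cfg.toList ['\n']).map pvLineA))

-- ===== PORT B =====
-- the one-bit state machine of Source B: armed = only spaces seen so far on this line
def pvGoB : Bool → List Char → List Char
  | _, [] => []
  | armed, c :: cs =>
    if c = '~' ∧ armed = true then pvGoB false cs
    else c :: pvGoB (if c = '\n' then true else if c ≠ ' ' then false else armed) cs

def rm_config_prefix_alt (cfg : String) : String :=
  if cfg = "" then cfg else String.ofList (pvGoB true cfg.toList)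

-- ===== PRECONDITION & SPEC =====
def Spec_rm_config_prefix (cfg : String) (out : String) : Prop := out = rm_config_prefix_alt cfg
instance (cfg : String) (out : String) : Decidable (Spec_rm_config_prefix cfg out) := by unfold Spec_rm_config_prefix; infer_instance

-- ===== CLAIM (what is proved, stated in full; the proofs are below) =====
def Claim_equal_rm_config_prefix : Prop := ∀ (cfg : String), Dom_rm_config_prefix cfg → Spec_rm_config_prefix cfg (rm_config_prefix cfg)

-- ===== LEMMAS AND PROOFS =====

-- PySem's fuel-based splitOn on a one-char separator is core's splitOnP
lemma pv_go_nil (fuel : Nat) (cur : List Char) (acc : List (List Char)) :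
    PySem.Chars.splitOn.go ['\n'] (fuel + 1) [] cur acc = (cur.reverse :: acc).reverse := by
  rw [PySem.Chars.splitOn.go.eq_def]

lemma pv_go_cons (fuel : Nat) (c : Char) (rest cur : List Char) (acc : List (List Char)) :
    PySem.Chars.splitOn.go ['\n'] (fuel + 1) (c :: rest) cur acc =
      (if List.isPrefixOf ['\n'] (c :: rest)
       then PySem.Chars.splitOn.go ['\n'] fuel rest [] (cur.reverse :: acc)
       else PySem.Chars.splitOn.go ['\n'] fuel rest (c :: cur) acc) := by
  rw [PySem.Chars.splitOn.go.eq_def]; rfl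

lemma pv_splitOn_go_eq (fuel : Nat) (l cur : List Char) (acc : List (List Char))
    (h : l.length < fuel) :
    PySem.Chars.splitOn.go ['\n'] fuel l cur acc
      = acc.reverse ++ (List.splitOnP (· == '\n') l).modifyHead (cur.reverse ++ ·) := by
  induction fuel generalizing l cur acc with
  | zero => omega
  | succ fuel ih =>
    cases l with
    | nil =>
      rw [pv_go_nil]
      simp [List.splitOnP_nil, List.modifyHead]
    | cons c rest =>
      by_cases hc : c = '\n'
      · subst hc
        have : List.isPrefixOf ['\n'] ('\n' :: rest) = true := by simp [List.isPrefixOf]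
        rw [pv_go_cons]
        simp only [this, if_pos]
        rw [ih _ _ _ (by simpa using Nat.lt_of_succ_lt_succ (by simpa using h))]
        rcases hne : List.splitOnP (fun x => x == '\n') rest with _ | ⟨hd, tl⟩
        · exact absurd hne (List.splitOnP_ne_nil _ _)
        · simp [List.splitOnP_cons, hne, List.modifyHead]
      · have : List.isPrefixOf ['\n'] (c :: rest) = false := by
          have hb : ('\n' == c) = false := beq_eq_false_iff_ne.mpr (fun h' => hc h'.symm)
          simp [List.isPrefixOf, hb]
        rw [pv_go_cons]
        simp only [this, Bool.false_eq_true, if_neg, not_false_iff]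
        rw [ih _ _ _ (by simpa using Nat.lt_of_succ_lt_succ (by simpa using h))]
        rcases hne : List.splitOnP (fun x => x == '\n') rest with _ | ⟨hd, tl⟩
        · exact absurd hne (List.splitOnP_ne_nil _ _)
        · simp [List.splitOnP_cons, hne, hc, List.modifyHead]

lemma pv_splitOn_newline (cs : List Char) :
    PySem.Chars.splitOn cs ['\n'] = List.splitOnP (· == '\n') cs := by
  rw [PySem.Chars.splitOn, pv_splitOn_go_eq _ _ _ _ (by omega)]
  rcases hne : List.splitOnP (fun x => x == '\n') cs with _ | ⟨hd, tl⟩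
  · exact absurd hne (List.splitOnP_ne_nil _ _)
  · simp [List.modifyHead]

lemma pv_goB_nil (b : Bool) : pvGoB b [] = [] := by cases b <;> rfl

lemma pv_goB_newline (b : Bool) (t : List Char) :
    pvGoB b ('\n' :: t) = '\n' :: pvGoB true t := by
  cases b <;> simp [pvGoB]

-- once disarmed, a newline-free block is copied verbatim
lemma pv_goB_copy (l : List Char) (h : '\n' ∉ l) (t : List Char) :
    pvGoB false (l ++ t) = l ++ pvGoB false t := by
  induction l with
  | nil => rfl
  | cons c cs ih =>
    have hc : c ≠ '\n' := fun hcn => h (hcn ▸ List.mem_cons_self)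
    have hcs : '\n' ∉ cs := fun hm => h (List.mem_cons_of_mem _ hm)
    by_cases hsp : c = ' '
    · subst hsp; simp [pvGoB, ih hcs]
    · simp [pvGoB, hc, hsp, ih hcs]

lemma pv_slice_take (xs : List Char) (n : Nat) :
    PySem.List.slice xs none (some (n : Int)) = List.take n xs := by
  rw [PySem.List.slice_to _ (by positivity)]; simp

-- equations of A's per-line body
lemma pv_lineA_nil : pvLineA [] = [] := rfl

lemma pv_lineA_space (l : List Char) : pvLineA (' ' :: l) = ' ' :: pvLineA l := by
  by_cases hm : '~' ∈ l
  · have hm' : '~' ∈ (' ' :: l) := List.mem_cons_of_mem _ hm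
    have hne : l ≠ [] := by rintro rfl; simp at hm
    have hi1 : PySem.Chars.isIn ['~'] (' ' :: l) = true := by
      rw [PySem.Chars.isIn_iff_infix, List.singleton_infix_iff]; exact hm'
    have hi2 : PySem.Chars.isIn ['~'] l = true := by
      rw [PySem.Chars.isIn_iff_infix, List.singleton_infix_iff]; exact hm
    obtain ⟨i, hidx⟩ := Option.isSome_iff_exists.mp ((PySem.List.index?_isSome_iff l '~').mpr hm)
    have hx2 : List.idxOf? '~' l = some i := by
      rw [← PySem.List.index?_eq_idxOf?]; exact hidx
    have hx1 : List.idxOf? '~' (' ' :: l) = some (i + 1) := by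
      rw [← PySem.List.index?_eq_idxOf?, PySem.List.index?_cons_of_ne _ (by decide), hidx]; rfl
    have hsl : PySem.List.slice (' ' :: l) none (some ((i : Int) + 1)) = ' ' :: List.take i l := by
      have h1 : ((i : Int) + 1) = ((i + 1 : Nat) : Int) := by push_cast; ring
      rw [h1, pv_slice_take, List.take_succ_cons]
    by_cases hcond : List.take i l = List.replicate i ' ' <;>
      simp [pvLineA, hi1, hi2, hne, hx1, hx2, hsl, List.replicate_succ, pvReplaceFirstTilde,
        hcond]
  · have hm' : '~' ∉ (' ' :: l) := by simp [hm]
    have hi1 : PySem.Chars.isIn ['~'] (' ' :: l) = false := by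
      rw [PySem.Chars.isIn_eq_false_iff, List.singleton_infix_iff]; exact hm'
    have hi2 : PySem.Chars.isIn ['~'] l = false := by
      rw [PySem.Chars.isIn_eq_false_iff, List.singleton_infix_iff]; exact hm
    rcases l with _ | ⟨c, cs⟩
    · rfl
    · simp [pvLineA, hi1, hi2]

lemma pv_lineA_tilde (l : List Char) : pvLineA ('~' :: l) = l := by
  have hi : PySem.Chars.isIn ['~'] ('~' :: l) = true := by
    rw [PySem.Chars.isIn_iff_infix, List.singleton_infix_iff]; exact List.mem_cons_self
  have hx : List.idxOf? '~' ('~' :: l) = some 0 := by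
    rw [← PySem.List.index?_eq_idxOf?]; exact PySem.List.index?_cons_self _ _
  have hsl : PySem.List.slice ('~' :: l) none (some ((0 : Nat) : Int)) = [] := by
    rw [pv_slice_take]; rfl
  simp only [Nat.cast_zero] at hsl
  simp [pvLineA, hi, hx, hsl, pvReplaceFirstTilde]

lemma pv_lineA_other (c : Char) (hc1 : c ≠ ' ') (hc2 : c ≠ '~') (l : List Char) :
    pvLineA (c :: l) = c :: l := by
  by_cases hm : '~' ∈ l
  · have hi : PySem.Chars.isIn ['~'] (c :: l) = true := by
      rw [PySem.Chars.isIn_iff_infix, List.singleton_infix_iff]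
      exact List.mem_cons_of_mem _ hm
    obtain ⟨i, hidx⟩ := Option.isSome_iff_exists.mp ((PySem.List.index?_isSome_iff l '~').mpr hm)
    have hx1 : List.idxOf? '~' (c :: l) = some (i + 1) := by
      rw [← PySem.List.index?_eq_idxOf?, PySem.List.index?_cons_of_ne _ hc2, hidx]; rfl
    have hsl : PySem.List.slice (c :: l) none (some ((i : Int) + 1)) = c :: List.take i l := by
      have h1 : ((i : Int) + 1) = ((i + 1 : Nat) : Int) := by push_cast; ring
      rw [h1, pv_slice_take, List.take_succ_cons]
    have hne : ¬ (c :: List.take i l = List.replicate (i + 1) ' ') := by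
      rw [List.replicate_succ]
      intro hEq
      exact hc1 (List.cons_eq_cons.mp hEq).1
    simp [pvLineA, hi, hx1, hsl, hne]
  · have hm' : '~' ∉ (c :: l) := by simp [hm, Ne.symm hc2]
    have hi : PySem.Chars.isIn ['~'] (c :: l) = false := by
      rw [PySem.Chars.isIn_eq_false_iff, List.singleton_infix_iff]; exact hm'
    simp [pvLineA, hi]

-- running B over one newline-free line: it emits A's per-line result and ends
-- armed exactly when the line was all spaces
lemma pv_lineRun (l : List Char) (h : '\n' ∉ l) (t : List Char) :
    pvGoB true (l ++ t) = pvLineA l ++ pvGoB (l.all (fun c => c == ' ')) t := by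
  induction l with
  | nil => simp [pv_lineA_nil]
  | cons c cs ih =>
    have hc : c ≠ '\n' := fun hcn => h (hcn ▸ List.mem_cons_self)
    have hcs : '\n' ∉ cs := fun hm => h (List.mem_cons_of_mem _ hm)
    by_cases ht : c = '~'
    · subst ht
      have : pvGoB true ('~' :: (cs ++ t)) = pvGoB false (cs ++ t) := by
        simp [pvGoB]
      rw [List.cons_append, this, pv_goB_copy cs hcs t, pv_lineA_tilde]
      simp [List.all_cons]
    · by_cases hsp : c = ' '
      · subst hsp
        have : pvGoB true (' ' :: (cs ++ t)) = ' ' :: pvGoB true (cs ++ t) := by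
          simp [pvGoB]
        rw [List.cons_append, this, ih hcs, pv_lineA_space]
        simp [List.all_cons]
      · have : pvGoB true (c :: (cs ++ t)) = c :: pvGoB false (cs ++ t) := by
          simp [pvGoB, ht, hsp, hc]
        rw [List.cons_append, this, pv_goB_copy cs hcs t, pv_lineA_other c hsp ht]
        have hb : (c == ' ') = false := beq_eq_false_iff_ne.mpr hsp
        simp [List.all_cons, hb]

lemma pv_splitOnP_no_newline (cs : List Char) :
    ∀ l ∈ List.splitOnP (· == '\n') cs, '\n' ∉ l := by
  induction cs with
  | nil => simp [List.splitOnP_nil]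
  | cons c rest ih =>
    by_cases hc : c = '\n'
    · subst hc
      simp only [List.splitOnP_cons, beq_self_eq_true, if_pos]
      intro l hl
      rcases List.mem_cons.mp hl with rfl | hl
      · simp
      · exact ih l hl
    · simp only [List.splitOnP_cons, beq_iff_eq, hc, if_false]
      rcases hne : List.splitOnP (fun x => x == '\n') rest with _ | ⟨hd, tl⟩
      · exact absurd hne (List.splitOnP_ne_nil _ _)
      · intro l hl
        rcases List.mem_cons.mp (by simpa [List.modifyHead] using hl) with rfl | hl
        · intro hmem
          rcases List.mem_cons.mp hmem with h1 | h1
          · exact hc h1.symm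
          · exact ih hd (hne ▸ List.mem_cons_self) h1
        · exact ih l (hne ▸ List.mem_cons_of_mem _ hl)

lemma pv_interc_singleton (sep l : List Char) : sep.intercalate [l] = l := by
  simp [List.intercalate]

lemma pv_interc_cons (sep a b : List Char) (t : List (List Char)) :
    sep.intercalate (a :: b :: t) = a ++ sep ++ sep.intercalate (b :: t) := by
  simp [List.intercalate, List.intersperse]

-- B's single pass over the joined lines equals A's map over the lines
lemma pv_linesRun (lines : List (List Char)) (hne : lines ≠ [])
    (hnl : ∀ l ∈ lines, '\n' ∉ l) :
    pvGoB true (List.intercalate ['\n'] lines)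
      = List.intercalate ['\n'] (lines.map pvLineA) := by
  induction lines with
  | nil => exact absurd rfl hne
  | cons l rest ih =>
    cases rest with
    | nil =>
      rw [List.map_cons, List.map_nil, pv_interc_singleton, pv_interc_singleton]
      have := pv_lineRun l (hnl l List.mem_cons_self) []
      simpa [pv_goB_nil] using this
    | cons l2 rest2 =>
      rw [pv_interc_cons, List.map_cons, List.map_cons, pv_interc_cons]
      have h1 : '\n' ∉ l := hnl l List.mem_cons_self
      rw [List.append_assoc, pv_lineRun l h1, List.singleton_append, pv_goB_newline,
        ih (by simp) (fun x hx => hnl x (List.mem_cons_of_mem _ hx))]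
      simp

-- ===== VERDICT (by name: the statement is the Claim_ definition above) =====
theorem rm_config_prefix_spec : Claim_equal_rm_config_prefix := by
  intro cfg _
  unfold Spec_rm_config_prefix rm_config_prefix rm_config_prefix_alt
  by_cases h : cfg = ""
  · simp [h]
  · simp only [h, if_false]
    congr 1
    have hsplit := pv_splitOn_newline cfg.toList
    have hjoin : PySem.Chars.join ['\n'] ((PySem.Chars.splitOn cfg.toList ['\n']).map pvLineA)
        = List.intercalate ['\n'] ((List.splitOnP (· == '\n') cfg.toList).map pvLineA) := by
      rw [hsplit]; rfl
    rw [hjoin]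
    have hcs : List.intercalate ['\n'] (List.splitOnP (· == '\n') cfg.toList) = cfg.toList := by
      have := List.intercalate_splitOn cfg.toList '\n'
      simpa [List.splitOn] using this
    conv_rhs => rw [← hcs]
    exact (pv_linesRun _ (List.splitOnP_ne_nil _ _) (pv_splitOnP_no_newline _)).symm
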